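-- pv_equiv track=rewrite | github.com/smoeina/Arbitrage | Edited_Version.py | extract_coefficient
-- ===== SOURCE A (Python) =====
-- def extract_coefficient(name):
--     """
--     Given a string `name`, this function extracts the starting numeric coefficient
--     from the string and returns it as an integer. If no numeric coefficient is found,
--     the function returns 1.
--
--     Parameters:
--     name (str): The string from which the numeric coefficient is to be extracted.
--
--     Returns:
--     int: The integer value of the extracted numeric coefficient or 1 if no numeric
--          coefficient is found.
--     """
--     coefficient = ""
--     for i in name:
--         if i.isdigit():
--             coefficient += i
--         elif coefficient:
--             break
--     return int(coefficient) if coefficient else 1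
-- ===== SOURCE B (Python) =====
-- def extract_coefficient(name):
--     # Two explicit phases: scan past leading non-digits, then scan the digit run,
--     # and convert the slice; no accumulator string or break flag.
--     n = len(name)
--     i = 0
--     while i < n and not name[i].isdigit():
--         i += 1
--     j = i
--     while j < n and name[j].isdigit():
--         j += 1
--     return int(name[i:j]) if j > i else 1
-- ===== Notes on version B (the rewrite author's own statement) =====
-- stated objective: alternative
-- what changed: Replaced the flag-guarded accumulator loop (append digits, break on the first non-digit after a digit) by two explicit index scans - skip to the first digit, then advance past the digit run - returning int of the slice name[i:j], with no accumulator string or break flag.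
import Mathlib
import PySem

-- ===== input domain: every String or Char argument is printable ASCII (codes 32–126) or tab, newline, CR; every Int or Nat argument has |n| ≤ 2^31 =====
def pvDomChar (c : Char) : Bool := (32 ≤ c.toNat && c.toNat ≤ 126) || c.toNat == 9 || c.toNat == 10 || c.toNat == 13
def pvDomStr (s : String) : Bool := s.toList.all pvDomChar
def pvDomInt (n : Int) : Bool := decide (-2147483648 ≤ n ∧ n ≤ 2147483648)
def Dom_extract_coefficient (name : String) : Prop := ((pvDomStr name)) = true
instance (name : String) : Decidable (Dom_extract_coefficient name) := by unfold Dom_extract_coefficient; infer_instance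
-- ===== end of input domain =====

-- B replaces A's flag-guarded accumulator loop by two explicit index scans and a slice
-- (objective: alternative decomposition, same O(n) cost).

-- ===== PORT A =====
-- the `for i in name:` loop; `break` forces a recursive helper carrying `coefficient`
def pvALoop (cs : List Char) (coefficient : List Char) : List Char :=
  match cs with
  | [] => coefficient
  | c :: rest =>
    if PySem.Chars.isdigit c then pvALoop rest (coefficient ++ [c])
    else if coefficient ≠ [] then coefficient        -- elif coefficient: break
    else pvALoop rest coefficient

def extract_coefficient (name : String) : Int :=
  let coefficient := pvALoop name.toList []
  -- int(coefficient): never raises here, coefficient is a nonempty run of isdigit chars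
  if coefficient ≠ [] then (PySem.Int.ofChars? coefficient).getD 1 else 1

-- ===== PORT B =====
-- one `while` loop: advance i while i < len and p(name[i])
def pvScan (cs : List Char) (p : Char → Bool) (i : Nat) : Nat :=
  if h : i < cs.length then
    if p cs[i] then pvScan cs p (i + 1) else i
  else i
termination_by cs.length - i

def extract_coefficient_alt (name : String) : Int :=
  let cs := name.toList
  let i := pvScan cs (fun c => !PySem.Chars.isdigit c) 0
  let j := pvScan cs (fun c => PySem.Chars.isdigit c) i
  -- name[i:j] with 0 ≤ i ≤ j ≤ len(name) is exactly drop i / take (j-i)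
  if i < j then (PySem.Int.ofChars? ((cs.drop i).take (j - i))).getD 1 else 1

-- ===== PRECONDITION & SPEC =====
def Spec_extract_coefficient (name : String) (out : Int) : Prop := out = extract_coefficient_alt name
instance (name : String) (out : Int) : Decidable (Spec_extract_coefficient name out) := by unfold Spec_extract_coefficient; infer_instance

-- ===== CLAIM (what is proved, stated in full; the proofs are below) =====
def Claim_equal_extract_coefficient : Prop := ∀ (name : String), Dom_extract_coefficient name → Spec_extract_coefficient name (extract_coefficient name)

-- ===== LEMMAS AND PROOFS =====

-- A's loop with a nonempty accumulator collects exactly the remaining digit run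
lemma pvALoop_ne (cs : List Char) : ∀ acc : List Char, acc ≠ [] →
    pvALoop cs acc = acc ++ cs.takeWhile PySem.Chars.isdigit := by
  induction cs with
  | nil => intro acc _; simp [pvALoop]
  | cons c rest ih =>
    intro acc hacc
    by_cases hd : PySem.Chars.isdigit c
    · simp [pvALoop, hd, ih (acc ++ [c]) (by simp)]
    · simp [pvALoop, hd, hacc]

-- A's loop from the empty accumulator = first digit run after the non-digit prefix
lemma pvALoop_nil (cs : List Char) :
    pvALoop cs [] =
      (cs.dropWhile (fun c => !PySem.Chars.isdigit c)).takeWhile PySem.Chars.isdigit := by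
  induction cs with
  | nil => simp [pvALoop]
  | cons c rest ih =>
    by_cases hd : PySem.Chars.isdigit c
    · simp [pvALoop, hd, pvALoop_ne rest [c] (by simp)]
    · simp [pvALoop, hd, ih]

-- B's while-scan lands at i + length of the p-run of the suffix
lemma pvScan_eq (cs : List Char) (p : Char → Bool) (i : Nat) :
    pvScan cs p i = i + ((cs.drop i).takeWhile p).length := by
  fun_induction pvScan cs p i with
  | case1 i h hp ih =>
    rw [ih, List.drop_eq_getElem_cons h, List.takeWhile_cons, hp]
    simp; omega
  | case2 i h hp =>
    rw [Bool.not_eq_true] at hp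
    rw [List.drop_eq_getElem_cons h, List.takeWhile_cons, hp]
    simp
  | case3 i h =>
    rw [List.drop_eq_nil_of_le (by omega)]
    simp

-- ===== VERDICT (by name: the statement is the Claim_ definition above) =====
theorem extract_coefficient_spec : Claim_equal_extract_coefficient := by
  intro name _
  unfold Spec_extract_coefficient extract_coefficient extract_coefficient_alt
  set cs := name.toList with hcs
  set q : Char → Bool := fun c => !PySem.Chars.isdigit c with hq
  have hsplit : cs.takeWhile q ++ cs.dropWhile q = cs := List.takeWhile_append_dropWhile
  set T := cs.takeWhile q with hT
  set D := cs.dropWhile q with hD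
  have hi : pvScan cs q 0 = T.length := by
    rw [pvScan_eq]; simp [hT]
  have hdrop : cs.drop T.length = D := by
    conv_lhs => rw [← hsplit]
    simp
  have hj : pvScan cs PySem.Chars.isdigit T.length
      = T.length + (D.takeWhile PySem.Chars.isdigit).length := by
    rw [pvScan_eq, hdrop]
  set R := D.takeWhile PySem.Chars.isdigit with hR
  have hRsplit : R ++ D.dropWhile PySem.Chars.isdigit = D := List.takeWhile_append_dropWhile
  have htake : (cs.drop T.length).take (T.length + R.length - T.length) = R := by
    rw [hdrop]
    conv_lhs => rw [← hRsplit]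
    simp
  have hA : pvALoop cs [] = R := pvALoop_nil cs
  simp only [hi, hj, hA, htake]
  by_cases hRe : R = []
  · simp [hRe]
  · have : T.length < T.length + R.length := by
      have : 0 < R.length := List.length_pos_iff.mpr hRe
      omega
    simp [hRe, this]
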